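-- pv_equiv track=rewrite | github.com/Programming-Assistant-AI-Bot/backend | routes/commentSuggestionRoutes.py | remove_partial_prefix
-- ===== SOURCE A (Python) =====
-- def remove_partial_prefix(result: str, prefix: str) -> str:
--     """
--     Removes any repeated or partial prefix from the start of the result.
--     Handles multi-line prefixes and partial overlaps.
--     """
--     prefix = prefix.strip()
--     result_strip = result.lstrip()
--
--     # If the result starts with the full prefix, remove it
--     if result_strip.startswith(prefix):
--         return result_strip[len(prefix):].lstrip("\n\r {")
--
--     # If not, check for the largest possible overlap
--     # We'll check for the longest suffix of the prefix that matches the start of the result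
--     for i in range(1, len(prefix)):
--         if result_strip.startswith(prefix[i:]):
--             return result_strip[len(prefix[i:]):].lstrip("\n\r {")
--     return result
-- ===== SOURCE B (Python) =====
-- def remove_partial_prefix(result: str, prefix: str) -> str:
--     # Same task, one pass: KMP prefix-function of r + '\x00' + p gives the longest
--     # suffix of p that is a prefix of r directly, instead of trying every suffix.
--     p = prefix.strip()
--     r = result.lstrip()
--     if not p:
--         return r.lstrip("\n\r {")
--     s = r + "\x00" + p
--     pi = [0] * len(s)
--     k = 0
--     for i in range(1, len(s)):
--         c = s[i]
--         while k > 0 and s[k] != c: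
--             k = pi[k - 1]
--         if s[k] == c:
--             k += 1
--         pi[i] = k
--     k = pi[-1]
--     if k == 0:
--         return result
--     return r[k:].lstrip("\n\r {")
-- ===== Notes on version B (the rewrite author's own statement) =====
-- stated objective: faster
-- what changed: A tries every suffix of the prefix against the start of the result with repeated startswith scans (quadratic); B computes the longest suffix-of-prefix/prefix-of-result overlap in one KMP prefix-function pass over result + '\x00' + prefix.
import Mathlib
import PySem

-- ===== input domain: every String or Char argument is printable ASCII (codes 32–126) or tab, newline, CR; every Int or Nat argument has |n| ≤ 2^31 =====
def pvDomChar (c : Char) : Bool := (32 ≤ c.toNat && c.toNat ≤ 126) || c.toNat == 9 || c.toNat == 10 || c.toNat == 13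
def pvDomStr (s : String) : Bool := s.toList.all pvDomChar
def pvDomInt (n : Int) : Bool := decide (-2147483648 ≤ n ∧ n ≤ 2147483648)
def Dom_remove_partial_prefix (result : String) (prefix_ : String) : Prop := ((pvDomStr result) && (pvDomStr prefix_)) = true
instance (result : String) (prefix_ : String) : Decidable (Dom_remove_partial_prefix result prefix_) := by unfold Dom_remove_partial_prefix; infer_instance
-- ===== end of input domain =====

-- B replaces A's try-every-suffix scan by one KMP prefix-function pass over result + '\x00' + prefix (measured asymptotically faster).

-- ===== PORT A =====
-- the char set of the trailing .lstrip("\n\r {")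
def pvStripSet : List Char := "\n\r {".toList

-- hand port of Python's s.lstrip(chars): drop leading characters that occur in chars (exact, code-point-wise)
def pvLstripChars (cs : List Char) (chars : List Char) : List Char :=
  cs.dropWhile (fun c => chars.contains c)

-- the 'for i in range(1, len(prefix))' loop with its early return
def pvLoopA (r p : List Char) (result : String) : List Int → String
  | [] => result
  | i :: rest =>
    let suff := PySem.List.slice p (some i) none
    if PySem.Chars.startswith r suff then
      String.ofList (pvLstripChars (PySem.List.slice r (some (PySem.List.len suff)) none) pvStripSet)
    else pvLoopA r p result rest

def remove_partial_prefix (result : String) (prefix_ : String) : String :=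
  let p := (PySem.Str.strip prefix_).toList
  let r := (PySem.Str.lstrip result).toList
  if PySem.Chars.startswith r p then
    String.ofList (pvLstripChars (PySem.List.slice r (some (PySem.List.len p)) none) pvStripSet)
  else
    pvLoopA r p result (PySem.List.pyRange 1 (PySem.List.len p) 1)

-- ===== PORT B =====
def pvSep : Char := Char.ofNat 0   -- the '\x00' separator of Source B

-- Source B's inner 'while k > 0 and s[k] != c' followed by the 'if s[k] == c: k += 1';
-- the fuel argument only makes the descent structural (it never runs out: pi[k-1] ≤ k-1)
def pvChase (s : List Char) (pis : List Nat) (c : Char) : Nat → Nat → Nat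
  | _, 0 => if s.getD 0 pvSep == c then 1 else 0
  | 0, _ + 1 => 0
  | fuel + 1, m + 1 =>
    if s.getD (m + 1) pvSep == c then m + 2 else pvChase s pis c fuel (pis.getD m 0)

-- Source B's 'for i in range(1, len(s))' building the prefix-function table pi
def pvBuildPi (s : List Char) : List Char → Nat → List Nat → List Nat
  | [], _, pis => pis
  | c :: rest, k, pis =>
    let k' := pvChase s pis c k k
    pvBuildPi s rest k' (pis ++ [k'])

def remove_partial_prefix_alt (result : String) (prefix_ : String) : String :=
  let p := (PySem.Str.strip prefix_).toList
  let r := (PySem.Str.lstrip result).toList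
  if p = [] then String.ofList (pvLstripChars r pvStripSet)
  else
    let s := r ++ pvSep :: p
    let pis := pvBuildPi s (s.drop 1) 0 [0]
    let k := PySem.List.pyGetD pis (-1) 0
    if k = 0 then result
    else String.ofList (pvLstripChars (PySem.List.slice r (some (k : Int)) none) pvStripSet)

-- ===== PRECONDITION & SPEC =====
def Spec_remove_partial_prefix (result : String) (prefix_ : String) (out : String) : Prop := out = remove_partial_prefix_alt result prefix_
instance (result : String) (prefix_ : String) (out : String) : Decidable (Spec_remove_partial_prefix result prefix_ out) := by unfold Spec_remove_partial_prefix; infer_instance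

-- ===== CLAIM (what is proved, stated in full; the proofs are below) =====
def Claim_equal_remove_partial_prefix : Prop := ∀ (result : String) (prefix_ : String), Dom_remove_partial_prefix result prefix_ → Spec_remove_partial_prefix result prefix_ (remove_partial_prefix result prefix_)

-- ===== LEMMAS AND PROOFS =====

-- `t` has a border of length `k`: its length-k prefix equals its length-k suffix
def pvBorder (t : List Char) (k : Nat) : Bool := t.take k == t.drop (t.length - k)

-- longest proper border length (the KMP prefix-function value of t)
def pvPi (t : List Char) : Nat := Nat.findGreatest (fun k => pvBorder t k = true) (t.length - 1)

theorem pvBorder_iff (t : List Char) (k : Nat) :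
    pvBorder t k = true ↔ t.take k = t.drop (t.length - k) := by
  simp [pvBorder]

theorem pvBorder_zero (t : List Char) : pvBorder t 0 = true := by
  simp [pvBorder]

theorem pvPi_border (t : List Char) : pvBorder t (pvPi t) = true := by
  exact Nat.findGreatest_spec (P := fun k => pvBorder t k = true) (Nat.zero_le _) (pvBorder_zero t)

theorem pvPi_le (t : List Char) : pvPi t ≤ t.length - 1 :=
  Nat.findGreatest_le _

theorem pvPi_max (t : List Char) (k : Nat) (hk : k ≤ t.length - 1)
    (hb : pvBorder t k = true) : k ≤ pvPi t :=
  Nat.le_findGreatest hk hb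

theorem pvGetD_take (u : List Char) (i j : Nat) (d : Char) (h : j < i) :
    (u.take i).getD j d = u.getD j d := by
  simp [List.getD, h]

theorem pvBorder_snoc (t : List Char) (c : Char) (k : Nat) (hk : k < t.length) :
    (pvBorder (t ++ [c]) (k + 1) = true) ↔ (pvBorder t k = true ∧ t.getD k pvSep = c) := by
  rw [pvBorder_iff, pvBorder_iff]
  have h1 : (t ++ [c]).take (k + 1) = t.take k ++ [t.getD k pvSep] := by
    rw [List.take_append]
    have h0 : k + 1 - t.length = 0 := by omega
    rw [h0, List.take_zero, List.append_nil, List.take_add_one,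
      List.getElem?_eq_getElem hk, List.getD_eq_getElem _ _ hk]
    rfl
  have h2 : (t ++ [c]).drop ((t ++ [c]).length - (k + 1)) = t.drop (t.length - k) ++ [c] := by
    have hl : (t ++ [c]).length - (k + 1) = t.length - k := by
      simp only [List.length_append, List.length_cons, List.length_nil]
      omega
    rw [hl, List.drop_append]
    have h0 : t.length - k - t.length = 0 := by omega
    rw [h0, List.drop_zero]
  rw [h1, h2]
  constructor
  · intro h
    obtain ⟨ha, hb⟩ := List.append_inj' h (by simp)
    exact ⟨ha, by simpa using hb⟩
  · rintro ⟨ha, hb⟩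
    rw [ha, hb]

theorem pvBorder_take_iff (t : List Char) (k j : Nat) (hbk : pvBorder t k = true)
    (hk : k ≤ t.length) (hj : j ≤ k) :
    (pvBorder (t.take k) j = true) ↔ (pvBorder t j = true) := by
  rw [pvBorder_iff] at hbk
  rw [pvBorder_iff, pvBorder_iff]
  have hlt : (t.take k).length = k := by simp [hk]
  rw [hlt, List.take_take, Nat.min_eq_left hj, hbk, List.drop_drop]
  have : t.length - k + (k - j) = t.length - j := by omega
  rw [this]

theorem pvPi_snoc_eq (t : List Char) (c : Char) (k : Nat)
    (hb : pvBorder t k = true) (hk : k < t.length) (hc : t.getD k pvSep = c)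
    (habove : ∀ j, k < j → j < t.length → pvBorder t j = true → t.getD j pvSep ≠ c) :
    pvPi (t ++ [c]) = k + 1 := by
  have hlen : (t ++ [c]).length = t.length + 1 := by simp
  apply le_antisymm
  · by_contra hcon
    rw [not_le] at hcon
    have hbm := pvPi_border (t ++ [c])
    have hm_le : pvPi (t ++ [c]) ≤ t.length := by
      have := pvPi_le (t ++ [c]); omega
    obtain ⟨j, hj⟩ : ∃ j, pvPi (t ++ [c]) = j + 1 := ⟨pvPi (t ++ [c]) - 1, by omega⟩
    rw [hj] at hbm
    rw [pvBorder_snoc t c j (by omega)] at hbm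
    exact habove j (by omega) (by omega) hbm.1 hbm.2
  · apply pvPi_max
    · omega
    · exact (pvBorder_snoc t c k hk).mpr ⟨hb, hc⟩

theorem pvPi_snoc_zero (t : List Char) (c : Char)
    (h : ∀ j, j < t.length → pvBorder t j = true → t.getD j pvSep ≠ c) :
    pvPi (t ++ [c]) = 0 := by
  unfold pvPi
  rw [Nat.findGreatest_eq_zero_iff]
  intro m h0 hle hP
  have hlen : (t ++ [c]).length = t.length + 1 := by simp
  obtain ⟨j, rfl⟩ : ∃ j, m = j + 1 := ⟨m - 1, by omega⟩
  have hjlt : j < t.length := by omega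
  rw [pvBorder_snoc t c j hjlt] at hP
  exact h j hjlt hP.1 hP.2

theorem pvChase_spec (u : List Char) (pis : List Nat) (c : Char) (i : Nat)
    (hi : 0 < i) (hiu : i ≤ u.length)
    (hpis : ∀ m, m < i → pis.getD m 0 = pvPi (u.take (m + 1))) :
    ∀ (fuel k : Nat), pvBorder (u.take i) k = true → k < i → k ≤ fuel →
    (∀ j, k < j → j < i → pvBorder (u.take i) j = true → (u.take i).getD j pvSep ≠ c) →
    pvChase u pis c fuel k = pvPi (u.take i ++ [c]) := by
  have htlen : (u.take i).length = i := by simp [hiu]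
  -- the k = 0 case, shared by both fuel branches
  have base : ∀ fuel, (∀ j, 0 < j → j < i → pvBorder (u.take i) j = true → (u.take i).getD j pvSep ≠ c) →
      pvChase u pis c fuel 0 = pvPi (u.take i ++ [c]) := by
    intro fuel habove
    have hred : pvChase u pis c fuel 0 = if u.getD 0 pvSep == c then 1 else 0 := by
      cases fuel <;> rfl
    rw [hred]
    have hget : (u.take i).getD 0 pvSep = u.getD 0 pvSep := pvGetD_take u i 0 pvSep hi
    by_cases hc : u.getD 0 pvSep = c
    · rw [if_pos (by simpa using hc)]
      exact (pvPi_snoc_eq (u.take i) c 0 (pvBorder_zero _) (by omega) (hget.trans hc)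
        (fun j h1 h2 hb => habove j h1 (htlen ▸ h2) hb)).symm
    · rw [if_neg (by simpa using hc)]
      symm
      apply pvPi_snoc_zero
      intro j hj hbj
      have hj' : j < i := htlen ▸ hj
      rcases Nat.eq_zero_or_pos j with rfl | hj0
      · rw [hget]; exact hc
      · exact habove j hj0 hj' hbj
  intro fuel
  induction fuel with
  | zero =>
    intro k hb hk hfuel habove
    obtain rfl : k = 0 := by omega
    exact base 0 habove
  | succ fuel ih =>
    intro k hb hk hfuel habove
    rcases k with _ | m
    · exact base (fuel + 1) habove
    · show pvChase u pis c (fuel + 1) (m + 1) = _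
      rw [pvChase]
      have hget : (u.take i).getD (m + 1) pvSep = u.getD (m + 1) pvSep :=
        pvGetD_take u i (m + 1) pvSep hk
      by_cases hc : u.getD (m + 1) pvSep = c
      · rw [if_pos (by simpa using hc)]
        exact (pvPi_snoc_eq (u.take i) c (m + 1) hb (by omega) (hget.trans hc)
          (fun j h1 h2 hbj => habove j h1 (htlen ▸ h2) hbj)).symm
      · rw [if_neg (by simpa using hc)]
        -- the failure link: k' = π(u.take (m+1))
        have hk'def : pis.getD m 0 = pvPi (u.take (m + 1)) := hpis m (by omega)
        set k' := pis.getD m 0 with hk'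
        have htake : (u.take i).take (m + 1) = u.take (m + 1) := by
          rw [List.take_take, Nat.min_eq_left (by omega)]
        have hlen' : (u.take (m + 1)).length = m + 1 := by
          simp; omega
        have hk'le : k' ≤ m := by
          have := pvPi_le (u.take (m + 1)); omega
        have hbk' : pvBorder (u.take i) k' = true := by
          have hb' := pvPi_border (u.take (m + 1))
          rw [← hk'def] at hb'
          rw [← htake] at hb'
          exact (pvBorder_take_iff (u.take i) (m + 1) k' hb (by omega) (by omega)).mp hb'
        have habove' : ∀ j, k' < j → j < i → pvBorder (u.take i) j = true →
            (u.take i).getD j pvSep ≠ c := by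
          intro j hj1 hj2 hbj
          rcases Nat.lt_trichotomy j (m + 1) with hlt | rfl | hgt
          · -- k' < j < m+1 : j would be a proper border of u.take (m+1) above its π
            exfalso
            have hbj' : pvBorder (u.take (m + 1)) j = true := by
              rw [← htake]
              exact (pvBorder_take_iff (u.take i) (m + 1) j hb (by omega) (by omega)).mpr hbj
            have := pvPi_max (u.take (m + 1)) j (by omega) hbj'
            omega
          · rw [hget]; exact hc
          · exact habove j (by omega) hj2 hbj
        exact ih k' hbk' (by omega) (by omega) habove'

theorem pvBuildPi_spec (u : List Char) :
    ∀ (rest : List Char) (i : Nat) (pis : List Nat), u.drop i = rest → 0 < i → i ≤ u.length →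
    pis.length = i → (∀ m, m < i → pis.getD m 0 = pvPi (u.take (m + 1))) →
    (pvBuildPi u rest (pis.getD (i - 1) 0) pis).length = u.length ∧
      (∀ m, m < u.length → (pvBuildPi u rest (pis.getD (i - 1) 0) pis).getD m 0 = pvPi (u.take (m + 1))) := by
  intro rest
  induction rest with
  | nil =>
    intro i pis hdrop hi hiu hlen hpis
    have : u.length ≤ i := by
      rw [← List.drop_eq_nil_iff]; exact hdrop
    have hieq : i = u.length := by omega
    simp only [pvBuildPi]
    exact ⟨by omega, fun m hm => hpis m (by omega)⟩
  | cons c rest' ih =>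
    intro i pis hdrop hi hiu hlen hpis
    have hi_lt : i < u.length := by
      by_contra hcon
      rw [List.drop_eq_nil_of_le (by omega)] at hdrop
      simp at hdrop
    have hcons := List.getElem_cons_drop hi_lt
    rw [hdrop] at hcons
    injection hcons with hc hrest
    have hkprev : pis.getD (i - 1) 0 = pvPi (u.take i) := by
      have h := hpis (i - 1) (by omega)
      have : i - 1 + 1 = i := by omega
      rwa [this] at h
    have htlen : (u.take i).length = i := by simp [Nat.le_of_lt hi_lt]
    have hk' : pvChase u pis c (pis.getD (i - 1) 0) (pis.getD (i - 1) 0) =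
        pvPi (u.take i ++ [c]) := by
      apply pvChase_spec u pis c i hi (Nat.le_of_lt hi_lt) hpis
      · rw [hkprev]; exact pvPi_border _
      · have := pvPi_le (u.take i); omega
      · rw [hkprev]
      · intro j hj1 hj2 hbj
        exfalso
        have := pvPi_max (u.take i) j (by omega) hbj
        omega
    have htc : u.take i ++ [c] = u.take (i + 1) := by
      rw [List.take_add_one, List.getElem?_eq_getElem hi_lt, hc]
      rfl
    simp only [pvBuildPi]
    rw [hk', htc]
    have hgoal := ih (i + 1) (pis ++ [pvPi (u.take (i + 1))]) hrest (by omega) (by omega)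
      (by simp [hlen])
      (by
        intro m hm
        rcases Nat.lt_or_ge m i with hmi | hmi
        · rw [List.getD_append _ _ _ _ (by omega)]
          exact hpis m hmi
        · have hmeq : m = i := by omega
          subst hmeq
          rw [List.getD]
          rw [List.getElem?_append_right (by omega), hlen]
          simp)
    have harg : (pis ++ [pvPi (u.take (i + 1))]).getD (i + 1 - 1) 0 = pvPi (u.take (i + 1)) := by
      rw [List.getD]
      rw [List.getElem?_append_right (by omega), hlen]
      simp
    rwa [harg] at hgoal

-- the computed pi[-1] is the prefix-function value of the whole combined string
theorem pvPiFinal (u : List Char) (hu : 1 ≤ u.length) :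
    PySem.List.pyGetD (pvBuildPi u (u.drop 1) 0 [0]) (-1) 0 = pvPi u := by
  have hpi1 : pvPi (u.take 1) = 0 := by
    have h1 : (u.take 1).length = 1 := by simp [hu]
    unfold pvPi
    rw [h1]
    exact Nat.findGreatest_zero
  have hspec := pvBuildPi_spec u (u.drop 1) 1 [0] rfl Nat.one_pos hu rfl
    (by
      intro m hm
      obtain rfl : m = 0 := by omega
      simpa using hpi1.symm)
  have harg : ([0] : List Nat).getD (1 - 1) 0 = 0 := rfl
  rw [harg] at hspec
  obtain ⟨hlen, hval⟩ := hspec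
  have hne : pvBuildPi u (u.drop 1) 0 [0] ≠ [] := by
    intro hnil
    rw [hnil] at hlen
    simp at hlen
    omega
  rw [PySem.List.pyGetD_neg_one _ _ hne]
  rw [List.getLast_eq_getElem]
  have := hval (u.length - 1) (by omega)
  rw [List.getD, List.getElem?_eq_getElem (by omega)] at this
  simp only [hlen] at *
  rw [Option.getD_some] at this
  rw [this]
  have : u.length - 1 + 1 = u.length := by omega
  rw [this, List.take_length]

-- k matches: the length-k suffix of p equals the length-k prefix of r
def pvQ (r p : List Char) (k : Nat) : Prop :=
  k ≤ p.length ∧ k ≤ r.length ∧ r.take k = p.drop (p.length - k)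

theorem pvBorder_combined_iff (r p : List Char) (k : Nat)
    (hkp : k ≤ p.length) (hkr : k ≤ r.length) :
    pvBorder (r ++ pvSep :: p) k = true ↔ r.take k = p.drop (p.length - k) := by
  rw [pvBorder_iff]
  have hlen : (r ++ pvSep :: p).length = r.length + (p.length + 1) := by simp
  have h1 : (r ++ pvSep :: p).take k = r.take k := by
    rw [List.take_append]
    have : k - r.length = 0 := by omega
    rw [this, List.take_zero, List.append_nil]
  have h2 : (r ++ pvSep :: p).drop ((r ++ pvSep :: p).length - k) = p.drop (p.length - k) := by
    rw [hlen, List.drop_append]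
    rw [List.drop_eq_nil_of_le (by omega), List.nil_append]
    have : r.length + (p.length + 1) - k - r.length = (p.length - k) + 1 := by omega
    rw [this, List.drop_succ_cons]
  rw [h1, h2]

theorem pvPi_combined_le (r p : List Char) (hr : pvSep ∉ r) (hp : pvSep ∉ p) :
    pvPi (r ++ pvSep :: p) ≤ min p.length r.length := by
  set u := r ++ pvSep :: p with hu
  have hlen : u.length = r.length + (p.length + 1) := by simp [hu]
  have hb := pvPi_border u
  have hk_le : pvPi u ≤ u.length - 1 := pvPi_le u
  rw [pvBorder_iff] at hb
  set k := pvPi u with hkdef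
  -- pointwise consequence of the border equation
  have hpt : ∀ j, j < k → u[j]? = u[u.length - k + j]? := by
    intro j hj
    have := congrArg (fun l => l[j]?) hb
    simp only at this
    rw [List.getElem?_take_of_lt hj, List.getElem?_drop] at this
    exact this
  -- the separator occurs exactly at index r.length
  have hsep : ∀ idx, u[idx]? = some pvSep → idx = r.length := by
    intro idx hidx
    rcases Nat.lt_trichotomy idx r.length with hlt | heq | hgt
    · exfalso
      rw [hu, List.getElem?_append_left hlt] at hidx
      exact hr (List.mem_of_getElem? hidx)
    · exact heq
    · exfalso
      rw [hu, List.getElem?_append_right (by omega)] at hidx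
      obtain ⟨m, hm⟩ : ∃ m, idx - r.length = m + 1 := ⟨idx - r.length - 1, by omega⟩
      rw [hm] at hidx
      simp only [List.getElem?_cons_succ] at hidx
      exact hp (List.mem_of_getElem? hidx)
  have hsep' : u[r.length]? = some pvSep := by
    rw [hu, List.getElem?_append_right (by omega)]
    simp
  by_contra hcon
  rw [Nat.le_min, not_and_or] at hcon
  rcases hcon with hcon | hcon
  · -- k > p.length : the suffix contains the separator
    rw [not_le] at hcon
    have hj : k - p.length - 1 < k := by omega
    have := hpt (k - p.length - 1) hj
    have hidx : u.length - k + (k - p.length - 1) = r.length := by omega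
    rw [hidx, hsep'] at this
    have := hsep _ this
    omega
  · -- k > r.length : the prefix contains the separator
    rw [not_le] at hcon
    have := hpt r.length hcon
    rw [hsep'] at this
    have := hsep _ this.symm
    omega

theorem pvQ_le_pi (r p : List Char) (k : Nat) (h : pvQ r p k) :
    k ≤ pvPi (r ++ pvSep :: p) := by
  obtain ⟨h1, h2, h3⟩ := h
  apply pvPi_max
  · simp
    omega
  · exact (pvBorder_combined_iff r p k h1 h2).mpr h3

theorem pvQ_pi (r p : List Char) (hr : pvSep ∉ r) (hp : pvSep ∉ p) :
    pvQ r p (pvPi (r ++ pvSep :: p)) := by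
  have hle := pvPi_combined_le r p hr hp
  refine ⟨by omega, by omega, ?_⟩
  exact (pvBorder_combined_iff r p _ (by omega) (by omega)).mp (pvPi_border _)

theorem pvQ_iff_prefix (r p : List Char) (i : Nat) (hi : i ≤ p.length) :
    (p.drop i <+: r) ↔ pvQ r p (p.length - i) := by
  rw [List.prefix_iff_eq_take]
  have hdl : (p.drop i).length = p.length - i := by simp
  constructor
  · intro h
    have hlen : p.length - i ≤ r.length := by
      have := congrArg List.length h
      rw [hdl, List.length_take] at this
      omega
    refine ⟨by omega, hlen, ?_⟩
    have : p.length - (p.length - i) = i := by omega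
    rw [this, ← hdl, ← h]
  · rintro ⟨h1, h2, h3⟩
    have : p.length - (p.length - i) = i := by omega
    rw [this] at h3
    rw [hdl, ← h3]

theorem pvLoopA_skip (r p : List Char) (result : String) :
    ∀ i0 : Nat, (∀ i : Nat, i0 ≤ i → i < p.length → ¬ (p.drop i <+: r)) →
    pvLoopA r p result (PySem.List.pyRange i0 p.length 1) = result := by
  suffices key : ∀ (n i0 : Nat), p.length - i0 ≤ n →
      (∀ i : Nat, i0 ≤ i → i < p.length → ¬ (p.drop i <+: r)) →
      pvLoopA r p result (PySem.List.pyRange i0 p.length 1) = result by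
    intro i0 h
    exact key (p.length - i0) i0 le_rfl h
  intro n
  induction n with
  | zero =>
    intro i0 hn h
    rw [PySem.List.pyRange_one_eq_nil (by exact_mod_cast Nat.le_of_sub_eq_zero (by omega))]
    rfl
  | succ n ih =>
    intro i0 hn h
    rcases Nat.lt_or_ge i0 p.length with hlt | hge
    · rw [PySem.List.pyRange_one_cons (by exact_mod_cast hlt)]
      show (if PySem.Chars.startswith r (PySem.List.slice p (some (i0 : Int)) none) = true
        then _ else pvLoopA r p result (PySem.List.pyRange ((i0 : Int) + 1) p.length 1)) = result
      rw [PySem.List.slice_from_natCast]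
      rw [if_neg (by
        rw [PySem.Chars.startswith_iff]
        exact h i0 le_rfl hlt)]
      have hcast : (i0 : Int) + 1 = ((i0 + 1 : Nat) : Int) := by push_cast; ring
      rw [hcast]
      exact ih (i0 + 1) (by omega) (fun i hi1 hi2 => h i (by omega) hi2)
    · rw [PySem.List.pyRange_one_eq_nil (by exact_mod_cast hge)]
      rfl

theorem pvLoopA_hit_here (r p : List Char) (result : String) (iK : Nat)
    (hKlt : iK < p.length) (hhit : p.drop iK <+: r) :
    pvLoopA r p result (PySem.List.pyRange iK p.length 1) =
      String.ofList (pvLstripChars (r.drop (p.length - iK)) pvStripSet) := by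
  rw [PySem.List.pyRange_one_cons (by exact_mod_cast hKlt)]
  show (if PySem.Chars.startswith r (PySem.List.slice p (some (iK : Int)) none) = true
    then String.ofList (pvLstripChars (PySem.List.slice r
      (some (PySem.List.len (PySem.List.slice p (some (iK : Int)) none))) none) pvStripSet)
    else _) = _
  rw [PySem.List.slice_from_natCast]
  rw [if_pos (by rw [PySem.Chars.startswith_iff]; exact hhit)]
  rw [PySem.List.len_eq, List.length_drop]
  rw [PySem.List.slice_from_natCast]

theorem pvLoopA_hit (r p : List Char) (result : String) (iK : Nat)
    (hKlt : iK < p.length) (hhit : p.drop iK <+: r) :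
    ∀ i0 : Nat, i0 ≤ iK → (∀ i : Nat, i0 ≤ i → i < iK → ¬ (p.drop i <+: r)) →
    pvLoopA r p result (PySem.List.pyRange i0 p.length 1) =
      String.ofList (pvLstripChars (r.drop (p.length - iK)) pvStripSet) := by
  suffices key : ∀ (n i0 : Nat), iK - i0 ≤ n → i0 ≤ iK →
      (∀ i : Nat, i0 ≤ i → i < iK → ¬ (p.drop i <+: r)) →
      pvLoopA r p result (PySem.List.pyRange i0 p.length 1) =
        String.ofList (pvLstripChars (r.drop (p.length - iK)) pvStripSet) by
    intro i0 h1 h2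
    exact key (iK - i0) i0 le_rfl h1 h2
  intro n
  induction n with
  | zero =>
    intro i0 hn hle h
    rw [show i0 = iK by omega]
    exact pvLoopA_hit_here r p result iK hKlt hhit
  | succ n ih =>
    intro i0 hn hle h
    rcases Nat.lt_or_ge i0 iK with hlt | hge
    · rw [PySem.List.pyRange_one_cons (by exact_mod_cast (by omega : i0 < p.length))]
      show (if PySem.Chars.startswith r (PySem.List.slice p (some (i0 : Int)) none) = true
        then _ else pvLoopA r p result (PySem.List.pyRange ((i0 : Int) + 1) p.length 1)) = _
      rw [PySem.List.slice_from_natCast]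
      rw [if_neg (by
        rw [PySem.Chars.startswith_iff]
        exact h i0 le_rfl hlt)]
      have hcast : (i0 : Int) + 1 = ((i0 + 1 : Nat) : Int) := by push_cast; ring
      rw [hcast]
      exact ih (i0 + 1) (by omega) (by omega) (fun i hi1 hi2 => h i (by omega) hi2)
    · rw [show i0 = iK by omega]
      exact pvLoopA_hit_here r p result iK hKlt hhit

theorem pvMemLstrip (cs : List Char) (x : Char) (h : x ∈ PySem.Chars.lstrip cs) : x ∈ cs := by
  simp only [PySem.Chars.lstrip] at h
  exact (List.dropWhile_sublist _).mem h

theorem pvMemStrip (cs : List Char) (x : Char) (h : x ∈ PySem.Chars.strip cs) : x ∈ cs := by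
  simp only [PySem.Chars.strip, PySem.Chars.rstrip, PySem.Chars.lstrip, List.mem_reverse] at h
  have h2 := (List.dropWhile_sublist _).mem h
  rw [List.mem_reverse] at h2
  exact (List.dropWhile_sublist _).mem h2

-- ===== VERDICT (by name: the statement is the Claim_ definition above) =====
theorem remove_partial_prefix_spec : Claim_equal_remove_partial_prefix := by
  intro result prefix_ hdom
  unfold Dom_remove_partial_prefix at hdom
  rw [Bool.and_eq_true] at hdom
  unfold Spec_remove_partial_prefix remove_partial_prefix remove_partial_prefix_alt
  dsimp only
  set p := (PySem.Str.strip prefix_).toList with hp_def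
  set r := (PySem.Str.lstrip result).toList with hr_def
  have hr_sep : pvSep ∉ r := by
    intro hmem
    rw [hr_def, PySem.Str.toList_lstrip] at hmem
    have h1 := pvMemLstrip _ _ hmem
    have h2 : pvDomChar pvSep = true := by
      have := hdom.1
      unfold pvDomStr at this
      rw [List.all_eq_true] at this
      exact this _ h1
    simp [pvDomChar, pvSep] at h2
  have hp_sep : pvSep ∉ p := by
    intro hmem
    rw [hp_def, PySem.Str.toList_strip] at hmem
    have h1 := pvMemStrip _ _ hmem
    have h2 : pvDomChar pvSep = true := by
      have := hdom.2
      unfold pvDomStr at this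
      rw [List.all_eq_true] at this
      exact this _ h1
    simp [pvDomChar, pvSep] at h2
  by_cases hp0 : p = []
  · -- empty stripped prefix: A's startswith("") branch fires, B's 'not p' branch fires
    rw [if_pos hp0]
    rw [if_pos (by rw [PySem.Chars.startswith_iff, hp0]; exact List.nil_prefix)]
    rw [hp0]
    norm_num [PySem.List.len, PySem.List.slice_zero_start, PySem.List.slice_none_none]
  · rw [if_neg hp0]
    have hu1 : 1 ≤ (r ++ pvSep :: p).length := by simp; omega
    rw [pvPiFinal (r ++ pvSep :: p) hu1]
    set K := pvPi (r ++ pvSep :: p) with hK_def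
    have hQK := pvQ_pi r p hr_sep hp_sep
    rw [← hK_def] at hQK
    by_cases hpre : p <+: r
    · -- full prefix: both remove p.length characters
      rw [if_pos (by rw [PySem.Chars.startswith_iff]; exact hpre)]
      have hKge : p.length ≤ K := by
        apply pvQ_le_pi
        refine ⟨le_rfl, hpre.length_le, ?_⟩
        rw [Nat.sub_self, List.drop_zero]
        exact (List.prefix_iff_eq_take.mp hpre).symm
      have hK : K = p.length := le_antisymm hQK.1 hKge
      have hKne : K ≠ 0 := by
        have : p.length ≠ 0 := fun h => hp0 (List.length_eq_zero_iff.mp h)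
        omega
      rw [if_neg hKne]
      rw [PySem.List.len_eq, PySem.List.slice_from_natCast, PySem.List.slice_from_natCast, hK]
    · rw [if_neg (by rw [PySem.Chars.startswith_iff]; exact hpre)]
      have hKlt : K < p.length := by
        rcases Nat.lt_or_ge K p.length with h | h
        · exact h
        · exfalso
          apply hpre
          have hKle := hQK.1
          have hK : K = p.length := by omega
          rw [List.prefix_iff_eq_take]
          have h3 := hQK.2.2
          rw [hK] at h3
          rw [Nat.sub_self, List.drop_zero] at h3
          exact h3.symm
      rw [PySem.List.len_eq]
      rw [show PySem.List.pyRange 1 (p.length : Int) 1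
          = PySem.List.pyRange ((1 : Nat) : Int) ((p.length : Nat) : Int) 1 from by norm_num]
      by_cases hK0 : K = 0
      · rw [if_pos hK0]
        apply pvLoopA_skip
        intro i hi1 hi2 hpref
        have hq := (pvQ_iff_prefix r p i (by omega)).mp hpref
        have := pvQ_le_pi r p _ hq
        omega
      · rw [if_neg hK0]
        have hiK1 : 1 ≤ p.length - K := by omega
        have hiKlt : p.length - K < p.length := by omega
        have hhit : p.drop (p.length - K) <+: r := by
          apply (pvQ_iff_prefix r p (p.length - K) (by omega)).mpr
          rw [show p.length - (p.length - K) = K by omega]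
          exact hQK
        rw [pvLoopA_hit r p result (p.length - K) hiKlt hhit 1 hiK1 (by
          intro i hi1 hi2 hpref
          have hq := (pvQ_iff_prefix r p i (by omega)).mp hpref
          have := pvQ_le_pi r p _ hq
          omega)]
        rw [show p.length - (p.length - K) = K by omega]
        rw [PySem.List.slice_from_natCast]
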